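-- pv_equiv track=rewrite | github.com/Priyanshi0912/DSA | GFG PODT JUNE/25 June  Left Rotate Matrix K times.py | rotateMatrix
-- ===== SOURCE A (Python) =====
-- def rotateMatrix(k, mat):
--     n = len(mat)
--     m = len(mat[0])
--     ans = [[0 for _ in range(m)] for _ in range(n)]  # Initialize the rotated matrix
--
--     # Rotate each element
--     for i in range(n):
--         for j in range(m):
--             new_j = (j - k) % m  # Calculate new column index after rotation
--             ans[i][new_j] = mat[i][j]  # Place the element in the rotated position
--
--     return ans
-- ===== SOURCE B (Python) =====
-- def rotateMatrix(k, mat):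
--     m = len(mat[0])
--     kk = k % m if m else 0
--     return [row[kk:m] + row[:kk] for row in mat]
-- ===== Notes on version B (the rewrite author's own statement) =====
-- stated objective: simpler
-- what changed: B computes kk = k % m once and builds each output row as the slice concatenation row[kk:m] + row[:kk] in a single comprehension, instead of allocating a zero matrix and scattering every element to column (j-k)%m with a per-element modulo.
import Mathlib
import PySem

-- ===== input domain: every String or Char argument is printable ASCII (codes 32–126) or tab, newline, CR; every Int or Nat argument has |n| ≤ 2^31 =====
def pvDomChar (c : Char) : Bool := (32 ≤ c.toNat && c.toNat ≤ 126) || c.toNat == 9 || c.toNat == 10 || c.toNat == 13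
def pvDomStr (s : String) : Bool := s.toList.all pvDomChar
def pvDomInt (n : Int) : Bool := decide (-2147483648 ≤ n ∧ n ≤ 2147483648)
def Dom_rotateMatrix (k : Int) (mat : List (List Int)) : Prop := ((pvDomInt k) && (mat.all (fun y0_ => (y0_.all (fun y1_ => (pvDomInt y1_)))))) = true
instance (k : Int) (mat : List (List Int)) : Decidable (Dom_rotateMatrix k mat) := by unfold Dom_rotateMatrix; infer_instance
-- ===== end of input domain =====

-- B builds each rotated row by two slices (row[kk:m] + row[:kk], with kk = k % m computed once)
-- instead of A's scatter of every element to column (j-k)%m in a pre-allocated zero matrix; objective: simpler.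

-- ===== PORT A =====
def rotateMatrix (k : Int) (mat : List (List Int)) : List (List Int) :=
  let n := mat.length
  let m := (mat.headD []).length
  let ans := List.replicate n (List.replicate m (0 : Int))
  (PySem.List.pyRange 0 n 1).foldl (fun ans i =>
    (PySem.List.pyRange 0 m 1).foldl (fun ans j =>
      let newj := PySem.Int.mod (j - k) m
      PySem.List.pySetD ans i
        (PySem.List.pySetD (PySem.List.pyGetD ans i [])
          newj
          (PySem.List.pyGetD (PySem.List.pyGetD mat i []) j 0))) ans) ans

-- ===== PORT B =====
def rotateMatrix_alt (k : Int) (mat : List (List Int)) : List (List Int) :=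
  let m := (mat.headD []).length
  let kk : Int := if (m : Int) = 0 then 0 else PySem.Int.mod k m
  mat.map (fun row =>
    PySem.List.slice row (some kk) (some (m : Int)) ++ PySem.List.slice row none (some kk))

-- ===== PRECONDITION & SPEC =====
-- Pre_ excludes exactly the inputs on which Python A raises: empty mat (mat[0] is an
-- IndexError) and ragged matrices with a row shorter than the first row (mat[i][j] raises).
def Pre_rotateMatrix (k : Int) (mat : List (List Int)) : Prop :=
  mat ≠ [] ∧ ∀ row ∈ mat, (mat.headD []).length ≤ row.length
instance (k : Int) (mat : List (List Int)) : Decidable (Pre_rotateMatrix k mat) := by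
  unfold Pre_rotateMatrix; infer_instance
def pvWitness_rotateMatrix : Int × List (List Int) := (2, [[1, 2, 3], [4, 5, 6]])

def Spec_rotateMatrix (k : Int) (mat : List (List Int)) (out : List (List Int)) : Prop := out = rotateMatrix_alt k mat
instance (k : Int) (mat : List (List Int)) (out : List (List Int)) : Decidable (Spec_rotateMatrix k mat out) := by unfold Spec_rotateMatrix; infer_instance

-- ===== CLAIM (what is proved, stated in full; the proofs are below) =====
def Claim_equal_rotateMatrix : Prop := ∀ (k : Int) (mat : List (List Int)), Dom_rotateMatrix k mat → Pre_rotateMatrix k mat → Spec_rotateMatrix k mat (rotateMatrix k mat)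

-- ===== LEMMAS AND PROOFS =====

-- A's inner loop, restricted to one row, over Nat indices.
def rowScatter (k : Int) (m : Nat) (r : List Int) (L : List Nat) (acc : List Int) : List Int :=
  L.foldl (fun acc (j : Nat) => acc.set ((PySem.Int.mod ((j : Int) - k) (m : Int)).toNat) (r.getD j 0)) acc

lemma rowScatter_length (k : Int) (m : Nat) (r : List Int) (L : List Nat) (acc : List Int) :
    (rowScatter k m r L acc).length = acc.length := by
  induction L generalizing acc with
  | nil => rfl
  | cons j L ih => rw [rowScatter, List.foldl_cons, ← rowScatter, ih]; simp

lemma rowScatter_no_hit (k : Int) (m : Nat) (r : List Int) (L : List Nat) (acc : List Int)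
    (t : Nat) (h : ∀ j ∈ L, (PySem.Int.mod ((j : Int) - k) (m : Int)).toNat ≠ t) :
    (rowScatter k m r L acc)[t]? = acc[t]? := by
  induction L generalizing acc with
  | nil => rfl
  | cons j L ih =>
    rw [rowScatter, List.foldl_cons, ← rowScatter, ih _ (fun j' hj' => h j' (by simp [hj']))]
    exact List.getElem?_set_ne (h j (by simp))

lemma rowScatter_hit (k : Int) (m : Nat) (r : List Int) (L1 L2 : List Nat) (j : Nat)
    (acc : List Int) (t : Nat) (hs : (PySem.Int.mod ((j : Int) - k) (m : Int)).toNat = t)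
    (ht : t < acc.length)
    (h2 : ∀ j' ∈ L2, (PySem.Int.mod ((j' : Int) - k) (m : Int)).toNat ≠ t) :
    (rowScatter k m r (L1 ++ j :: L2) acc)[t]? = some (r.getD j 0) := by
  rw [rowScatter, List.foldl_append, List.foldl_cons]
  rw [show ∀ s, List.foldl (fun acc (j : Nat) => acc.set ((PySem.Int.mod ((j : Int) - k) (m : Int)).toNat) (r.getD j 0)) s L2 = rowScatter k m r L2 s from fun _ => rfl]
  rw [rowScatter_no_hit _ _ _ _ _ _ h2, hs]
  exact List.getElem?_set_self (by rw [show List.foldl _ acc L1 = rowScatter k m r L1 acc from rfl, rowScatter_length]; omega)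

lemma rowScatter_cons (k : Int) (m : Nat) (r : List Int) (j : Nat) (L : List Nat) (acc : List Int) :
    rowScatter k m r (j :: L) acc
      = rowScatter k m r L (acc.set ((PySem.Int.mod ((j : Int) - k) (m : Int)).toNat) (r.getD j 0)) := rfl

lemma range_split (m j0 : Nat) (h : j0 < m) :
    List.range m = List.range j0 ++ j0 :: (List.range (m - (j0 + 1))).map (fun x => (j0 + 1) + x) := by
  conv_lhs => rw [show m = (j0 + 1) + (m - (j0 + 1)) from by omega]
  rw [List.range_add, List.range_succ, List.append_assoc, List.singleton_append]

lemma emod_add_mul (m a : Int) (q : Int) (h0 : 0 ≤ a) (h1 : a < m) : (a + q * m) % m = a := by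
  rw [mul_comm, Int.add_mul_emod_self_left, Int.emod_eq_of_lt h0 h1]

-- each target column has a unique source column
lemma sigma_inj (k : Int) (m : Nat) (hm : 0 < m) (j j' : Nat) (hj : j < m) (hj' : j' < m)
    (h : (PySem.Int.mod ((j : Int) - k) (m : Int)).toNat = (PySem.Int.mod ((j' : Int) - k) (m : Int)).toNat) :
    j = j' := by
  have hmpos : (0 : Int) < (m : Int) := by exact_mod_cast hm
  rw [PySem.Int.mod_eq_emod_of_pos hmpos, PySem.Int.mod_eq_emod_of_pos hmpos] at h
  have h1 : ((j : Int) - k) % (m : Int) = ((j' : Int) - k) % (m : Int) := by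
    have n1 : 0 ≤ ((j : Int) - k) % (m : Int) := Int.emod_nonneg _ (by omega)
    have n2 : 0 ≤ ((j' : Int) - k) % (m : Int) := Int.emod_nonneg _ (by omega)
    omega
  have hd : (m : Int) ∣ (((j : Int) - k) - ((j' : Int) - k)) :=
    Int.dvd_of_emod_eq_zero (Int.emod_eq_emod_iff_emod_sub_eq_zero.mp h1)
  have heq : ((j : Int) - k) - ((j' : Int) - k) = (j : Int) - (j' : Int) := by ring
  rw [heq] at hd
  have c1 : ((j : Int)) < m := by exact_mod_cast hj
  have c2 : ((j' : Int)) < m := by exact_mod_cast hj'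
  have := Int.eq_zero_of_abs_lt_dvd hd (abs_lt.mpr ⟨by omega, by omega⟩)
  omega

-- the inner full-matrix loop only edits row i
lemma inner_set (k : Int) (m : Nat) (r : List Int) (i : Nat) :
    ∀ (L : List Nat) (ans : List (List Int)), i < ans.length →
    L.foldl (fun ans (j : Nat) => ans.set i ((ans.getD i []).set ((PySem.Int.mod ((j : Int) - k) (m : Int)).toNat) (r.getD j 0))) ans
      = ans.set i (rowScatter k m r L (ans.getD i [])) := by
  intro L
  induction L with
  | nil =>
    intro ans hi
    rw [rowScatter, List.foldl_nil, List.foldl_nil, List.getD_eq_getElem _ _ hi, List.set_getElem_self]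
  | cons j L ih =>
    intro ans hi
    rw [List.foldl_cons, ih _ (by simp [hi]), List.set_set, rowScatter_cons]
    congr 2
    rw [List.getD_eq_getElem (List.set ans i _) _ (by simp [hi]), List.getElem_set_self (by simp [hi]),
      List.getD_eq_getElem _ _ hi]

-- the outer loop is a map over row indices
lemma outer_map (k : Int) (m : Nat) (v : Nat → List Int) :
    ∀ (n' : Nat) (s : List (List Int)), n' ≤ s.length →
    (List.range n').foldl (fun ans (i : Nat) =>
        (List.range m).foldl (fun ans (j : Nat) =>
          ans.set i ((ans.getD i []).set ((PySem.Int.mod ((j : Int) - k) (m : Int)).toNat) ((v i).getD j 0))) ans) s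
      = (List.range n').map (fun i => rowScatter k m (v i) (List.range m) (s.getD i [])) ++ s.drop n' := by
  intro n'
  induction n' with
  | zero => intro s _; simp
  | succ n' ih =>
    intro s hs
    rw [List.range_succ, List.foldl_append, ih s (by omega), List.foldl_cons, List.foldl_nil]
    have hlen : n' < s.length := by omega
    have hmaplen : ((List.range n').map (fun i => rowScatter k m (v i) (List.range m) (s.getD i []))).length = n' := by simp
    have hget : ((List.range n').map (fun i => rowScatter k m (v i) (List.range m) (s.getD i [])) ++ s.drop n').getD n' [] = s.getD n' [] := by
      rw [List.getD_eq_getElem?_getD, List.getD_eq_getElem?_getD, List.getElem?_append,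
        if_neg (by omega), hmaplen, Nat.sub_self, List.getElem?_drop, Nat.add_zero]
    rw [inner_set k m (v n') n' (List.range m) _ (by simp; omega), hget]
    rw [List.set_append, if_neg (by omega), hmaplen, Nat.sub_self,
      List.drop_eq_getElem_cons hlen, List.set_cons_zero]
    rw [List.map_append, List.map_singleton, List.append_assoc, List.singleton_append]

-- the scatter of one row equals B's two slices
lemma row_eq (k : Int) (m : Nat) (hm : 0 < m) (r : List Int) (hr : m ≤ r.length) :
    rowScatter k m r (List.range m) (List.replicate m 0)
      = PySem.List.slice r (some (PySem.Int.mod k (m : Int))) (some (m : Int))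
        ++ PySem.List.slice r none (some (PySem.Int.mod k (m : Int))) := by
  have hmpos : (0 : Int) < (m : Int) := by exact_mod_cast hm
  have hknn : 0 ≤ PySem.Int.mod k (m : Int) := PySem.Int.mod_nonneg k hmpos
  have hklt : PySem.Int.mod k (m : Int) < (m : Int) := PySem.Int.mod_lt k hmpos
  set kI := PySem.Int.mod k (m : Int) with hkI
  rw [PySem.List.slice_toNat r hknn (by positivity), PySem.List.slice_to r hknn]
  rw [show ((m : Int)).toNat = m from by omega]
  have hmodc : ∀ j : Nat, PySem.Int.mod ((j : Int) - k) (m : Int) = ((j : Int) - k) % (m : Int) :=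
    fun j => PySem.Int.mod_eq_emod_of_pos hmpos
  have hkdef : kI = k - (m : Int) * (k / (m : Int)) := by
    rw [hkI, PySem.Int.mod_eq_emod_of_pos hmpos, Int.emod_def]
  apply List.ext_getElem?
  intro t
  by_cases ht : t < m
  · -- the unique source index j0 of target column t
    set j0 : Nat := if t + kI.toNat < m then t + kI.toNat else t + kI.toNat - m with hj0
    have hj0m : j0 < m := by rw [hj0]; split <;> omega
    have hsj0 : (PySem.Int.mod ((j0 : Int) - k) (m : Int)).toNat = t := by
      rw [hmodc]
      have hval : ((j0 : Int) - k) % (m : Int) = (t : Int) := by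
        rw [hj0]
        split
        · have he : ((↑(t + kI.toNat) : Int) - k) = (t : Int) + (-(k / (m : Int))) * (m : Int) := by
            push_cast [Int.toNat_of_nonneg hknn]; linarith [hkdef]
          rw [he, emod_add_mul (m : Int) (t : Int) _ (by omega) (by exact_mod_cast ht)]
        · next hcase =>
          have he : ((↑(t + kI.toNat - m) : Int) - k) = (t : Int) + (-(k / (m : Int)) - 1) * (m : Int) := by
            have hc2 : ((↑(t + kI.toNat - m) : Int)) = (t : Int) + kI - m := by
              push_cast [show m ≤ t + kI.toNat from by omega]
              omega
            rw [hc2]; linarith [hkdef]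
          rw [he, emod_add_mul (m : Int) (t : Int) _ (by omega) (by exact_mod_cast ht)]
      omega
    rw [range_split m j0 hj0m]
    rw [rowScatter_hit k m r _ _ j0 _ t hsj0
      (by simpa using ht)
      (by
        intro j' hj'
        simp only [List.mem_map, List.mem_range] at hj'
        obtain ⟨x, hx, rfl⟩ := hj'
        intro hc
        have := sigma_inj k m hm _ j0 (by omega) hj0m (hc.trans hsj0.symm)
        omega)]
    rw [List.getElem?_append]
    have hj0r : j0 < r.length := by omega
    rw [List.getD_eq_getElem _ _ hj0r]
    have hlen1 : (List.take (m - kI.toNat) (List.drop kI.toNat r)).length = m - kI.toNat := by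
      simp; omega
    by_cases htk : t < m - kI.toNat
    · rw [if_pos (by omega), List.getElem?_take, if_pos htk, List.getElem?_drop]
      rw [List.getElem?_eq_getElem (by omega)]
      simp only [Option.some.injEq]
      congr 1
      rw [hj0]; split <;> omega
    · rw [if_neg (by omega), hlen1, List.getElem?_take, if_pos (by omega),
        List.getElem?_eq_getElem (by omega)]
      simp only [Option.some.injEq]
      congr 1
      rw [hj0]; split <;> omega
  · -- past the end: both none
    rw [List.getElem?_eq_none (by rw [rowScatter_length, List.length_replicate]; omega),
      List.getElem?_eq_none (by simp; omega)]

-- map over range of row indices is map over rows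
lemma map_range_getD (F : List Int → List Int) (l : List (List Int)) :
    (List.range l.length).map (fun i => F (l.getD i [])) = l.map F := by
  apply List.ext_getElem (by simp)
  intro i h1 h2
  simp only [List.getElem_map, List.getElem_range]
  rw [List.getD_eq_getElem _ _ (by simpa using h2)]

theorem rotateMatrix_spec : Claim_equal_rotateMatrix := by
  intro k mat _ hpre
  obtain ⟨hne, hrows⟩ := hpre
  unfold Spec_rotateMatrix rotateMatrix rotateMatrix_alt
  simp only [PySem.List.pyRange_zero_nat, List.foldl_map, PySem.List.pySetD_natCast,
    PySem.List.pyGetD_natCast]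
  by_cases hm0 : (mat.headD []).length = 0
  · -- first row empty: every output row is []
    have hrow : ∀ row : List Int,
        PySem.List.slice row (some (0:Int)) (some (0:Int)) ++ PySem.List.slice row none (some (0:Int))
          = ([] : List Int) := by
      intro row
      rw [PySem.List.slice_toNat row le_rfl le_rfl, PySem.List.slice_to row le_rfl]
      simp
    simp only [hm0, List.range_zero, List.foldl_nil, Nat.cast_zero, if_true, List.foldl_fixed, hrow]
    simp [List.map_const']
  · have hmpos : 0 < (mat.headD []).length := Nat.pos_of_ne_zero hm0
    rw [if_neg (by exact_mod_cast hm0)]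
    have hrw : ∀ (row : List Int) (jk : Int) (v : Int),
        PySem.List.pySetD row (PySem.Int.mod jk ((mat.headD []).length : Int)) v
          = row.set (PySem.Int.mod jk ((mat.headD []).length : Int)).toNat v :=
      fun row jk v => PySem.List.pySetD_of_nonneg row v
        (PySem.Int.mod_nonneg jk (by exact_mod_cast hmpos))
    simp only [hrw]
    rw [outer_map k (mat.headD []).length (fun i => mat.getD i []) mat.length
      (List.replicate mat.length (List.replicate (mat.headD []).length 0)) (by simp)]
    rw [List.drop_eq_nil_of_le (by simp), List.append_nil]
    have hrepl : ∀ i ∈ List.range mat.length,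
        rowScatter k (mat.headD []).length (mat.getD i []) (List.range (mat.headD []).length)
          ((List.replicate mat.length (List.replicate (mat.headD []).length (0:Int))).getD i [])
        = (fun r => rowScatter k (mat.headD []).length r (List.range (mat.headD []).length)
            (List.replicate (mat.headD []).length 0)) (mat.getD i []) := by
      intro i hi
      rw [List.getD_eq_getElem (List.replicate mat.length (List.replicate (mat.headD []).length (0:Int))) []
        (by simpa using hi), List.getElem_replicate]
    rw [List.map_congr_left hrepl]
    have hfinal := map_range_getD (fun r => rowScatter k (mat.headD []).length r
      (List.range (mat.headD []).length) (List.replicate (mat.headD []).length 0)) mat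
    rw [hfinal]
    apply List.map_congr_left
    intro r hr
    exact row_eq k (mat.headD []).length hmpos r (hrows r hr)
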